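-- pv_equiv track=rewrite | github.com/aposazhennikov/books-to-audio | src/book_normalizer/tts/assembler.py | _group_by_chapter
-- ===== SOURCE A (Python) =====
-- from typing import Any
--
-- def _group_by_chapter(
--     manifest: list[dict[str, Any]]
-- ) -> dict[int, list[dict[str, Any]]]:
--     """Group manifest entries by chapter_index."""
--     groups: dict[int, list[dict[str, Any]]] = {}
--     for entry in manifest:
--         ch = entry["chapter_index"]
--         groups.setdefault(ch, []).append(entry)
--     return groups
-- ===== SOURCE B (Python) =====
-- def _group_by_chapter(manifest):
--     """Group manifest entries by chapter_index (two-pass: distinct keys, then filter per key)."""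
--     keys = list(dict.fromkeys(entry["chapter_index"] for entry in manifest))
--     return {ch: [entry for entry in manifest if entry["chapter_index"] == ch] for ch in keys}
-- ===== Notes on version B (the rewrite author's own statement) =====
-- stated objective: alternative
-- what changed: Replaces A's single-pass dict accumulation (setdefault+append per entry) by a two-pass scheme: collect the distinct chapter keys in first-occurrence order with dict.fromkeys, then build each group by filtering the manifest per key.
import Mathlib
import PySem

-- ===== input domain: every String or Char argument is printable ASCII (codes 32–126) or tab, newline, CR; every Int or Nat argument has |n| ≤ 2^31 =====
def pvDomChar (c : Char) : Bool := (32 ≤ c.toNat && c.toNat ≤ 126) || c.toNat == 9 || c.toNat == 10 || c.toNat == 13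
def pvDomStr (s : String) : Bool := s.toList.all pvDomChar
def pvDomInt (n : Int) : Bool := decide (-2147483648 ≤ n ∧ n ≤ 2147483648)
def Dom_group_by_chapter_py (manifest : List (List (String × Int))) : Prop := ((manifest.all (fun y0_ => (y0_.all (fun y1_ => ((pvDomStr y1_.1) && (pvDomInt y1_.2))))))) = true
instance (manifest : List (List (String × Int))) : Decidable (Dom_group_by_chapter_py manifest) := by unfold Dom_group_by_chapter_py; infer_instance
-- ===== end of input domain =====

-- B replaces A's single-pass dict accumulation by a two-pass scheme: first-occurrence distinct
-- chapter keys (dict.fromkeys), then one filter pass over the manifest per key (objective: alternative).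

-- shared helper: entry["chapter_index"] — first-match lookup in the association list, 0 only outside Pre_
def pvEntryCh (e : List (String × Int)) : Int :=
  (((e.find? (fun p => p.1 == "chapter_index")).map (fun p => p.2)).getD 0)

-- ===== PORT A =====
def group_by_chapter_py (manifest : List (List (String × Int))) : List (Int × List (List (String × Int))) :=
  (manifest.foldl
    (fun groups entry => groups.modify (pvEntryCh entry) [] (fun l => l ++ [entry]))
    (PySem.Dict.empty : PySem.Dict Int (List (List (String × Int))))).items

-- ===== PORT B =====
def group_by_chapter_py_alt (manifest : List (List (String × Int))) : List (Int × List (List (String × Int))) :=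
  (PySem.List.dedup (manifest.map pvEntryCh)).map
    (fun ch => (ch, manifest.filter (fun entry => pvEntryCh entry == ch)))

-- ===== PRECONDITION & SPEC =====
-- Pre_ excludes entries missing the "chapter_index" key, on which the Python A raises KeyError (so does B).
def Pre_group_by_chapter_py (manifest : List (List (String × Int))) : Prop :=
  (manifest.all (fun e => e.any (fun p => p.1 == "chapter_index"))) = true
instance (manifest : List (List (String × Int))) : Decidable (Pre_group_by_chapter_py manifest) := by
  unfold Pre_group_by_chapter_py; infer_instance
def pvWitness_group_by_chapter_py : (List (List (String × Int))) :=
  [[("chapter_index", 1), ("file", 7)], [("chapter_index", 0)], [("chapter_index", 1)]]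
def Spec_group_by_chapter_py (manifest : List (List (String × Int))) (out : List (Int × List (List (String × Int)))) : Prop := out = group_by_chapter_py_alt manifest
instance (manifest : List (List (String × Int))) (out : List (Int × List (List (String × Int)))) : Decidable (Spec_group_by_chapter_py manifest out) := by unfold Spec_group_by_chapter_py; infer_instance

-- ===== CLAIM (what is proved, stated in full; the proofs are below) =====
def Claim_equal_group_by_chapter_py : Prop := ∀ (manifest : List (List (String × Int))), Dom_group_by_chapter_py manifest → Pre_group_by_chapter_py manifest → Spec_group_by_chapter_py manifest (group_by_chapter_py manifest)

-- ===== LEMMAS AND PROOFS =====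

-- the grouping loop of A, named for the lemmas below
def pvStep (groups : PySem.Dict Int (List (List (String × Int)))) (entry : List (String × Int)) :
    PySem.Dict Int (List (List (String × Int))) :=
  groups.modify (pvEntryCh entry) [] (fun l => l ++ [entry])

-- the common canonical form both ports compute
def pvGroups (ms : List (List (String × Int))) : List (Int × List (List (String × Int))) :=
  (PySem.Set.ofList (ms.map pvEntryCh)).map
    (fun ch => (ch, ms.filter (fun e => pvEntryCh e == ch)))

theorem pvFoldl_items (ms : List (List (String × Int))) :
    (ms.foldl pvStep (PySem.Dict.empty : PySem.Dict Int (List (List (String × Int))))).items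
      = pvGroups ms := by
  induction ms using List.reverseRecOn with
  | nil => rfl
  | append_singleton ms e ih =>
    rw [List.foldl_append, List.foldl_cons, List.foldl_nil]
    set d := ms.foldl pvStep (PySem.Dict.empty : PySem.Dict Int (List (List (String × Int)))) with hd
    set k := pvEntryCh e with hk
    have hitems : d.items = (PySem.Set.ofList (ms.map pvEntryCh)).map
        (fun ch => (ch, ms.filter (fun e' => pvEntryCh e' == ch))) := ih
    have hkeys : d.keys = PySem.Set.ofList (ms.map pvEntryCh) := by
      simp only [PySem.Dict.keys, hitems, List.map_map]
      simp [Function.comp_def]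
    have hnodup : d.keys.Nodup := by rw [hkeys]; exact PySem.Set.nodup_ofList _
    have hstep : pvStep d e = d.insert k (d.getD k [] ++ [e]) := by
      simp only [pvStep, PySem.Dict.modify, ← hk]
    have hgr : pvGroups (ms ++ [e]) =
        (PySem.Set.add (PySem.Set.ofList (ms.map pvEntryCh)) k).map
          (fun ch => (ch, ms.filter (fun e' => pvEntryCh e' == ch) ++ if k == ch then [e] else [])) := by
      simp only [pvGroups, List.map_append, List.map_cons, List.map_nil,
        PySem.Set.ofList_append_singleton, List.filter_append, List.filter_cons, List.filter_nil]
      rfl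
    by_cases hmem : k ∈ PySem.Set.ofList (ms.map pvEntryCh)
    · -- key already present: in-place replacement
      have hcont : d.contains k = true := by
        rw [PySem.Dict.contains_iff_mem_keys, hkeys]; exact hmem
      have hmemitems : (k, ms.filter (fun e' => pvEntryCh e' == k)) ∈ d.items := by
        rw [hitems]
        exact List.mem_map.mpr ⟨k, hmem, rfl⟩
      have hgetD : d.getD k [] = ms.filter (fun e' => pvEntryCh e' == k) :=
        PySem.Dict.getD_of_mem_items d hmemitems hnodup []
      rw [hstep, PySem.Dict.items_insert_of_contains d _ hcont, hitems, hgetD, hgr,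
        PySem.Set.add_of_mem hmem, List.map_map]
      refine List.map_congr_left ?_
      intro ch hch
      by_cases hck : ch = k
      · subst hck; simp
      · have h2 : (k == ch) = false := by rw [beq_eq_false_iff_ne]; exact Ne.symm hck
        simp [h2, hck]
    · -- new key: appended at the end
      have hcont : d.contains k = false := by
        rw [Bool.eq_false_iff]
        intro hc
        exact hmem (by rw [← hkeys]; exact (PySem.Dict.contains_iff_mem_keys d k).mp hc)
      have hgetD : d.getD k [] = [] := PySem.Dict.getD_of_not_contains d [] hcont
      have hnofilter : ms.filter (fun e' => pvEntryCh e' == k) = [] := by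
        rw [List.filter_eq_nil_iff]
        intro a ha hak
        apply hmem
        rw [PySem.Set.mem_ofList]
        exact List.mem_map.mpr ⟨a, ha, beq_iff_eq.mp hak⟩
      rw [hstep, PySem.Dict.items_insert_of_not_contains d _ hcont, hitems, hgetD, hgr,
        PySem.Set.add_of_not_mem hmem, List.map_append]
      congr 1
      · refine List.map_congr_left ?_
        intro ch hch
        have h2 : (k == ch) = false := by
          rw [beq_eq_false_iff_ne]
          intro h; exact hmem (h ▸ hch)
        simp [h2]
      · simp [hnofilter]

-- ===== VERDICT (by name: the statement is the Claim_ definition above) =====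
theorem group_by_chapter_py_spec : Claim_equal_group_by_chapter_py := by
  intro manifest _ _
  unfold Spec_group_by_chapter_py group_by_chapter_py group_by_chapter_py_alt
  rw [show (fun groups entry => PySem.Dict.modify groups (pvEntryCh entry) [] (fun l => l ++ [entry])) = pvStep from rfl,
      pvFoldl_items]
  simp [pvGroups]
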